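-- pv_equiv track=rewrite | github.com/mnkhmtv/kege | dev inf/пробник/25.py | pr_mn
-- ===== SOURCE A (Python) =====
-- def pr_mn(x):
--     s = []
--     d = 2
--     while d ** 2 <= x:
--         if x % d == 0:
--             s.append(d)
--             x //= d
--         else:
--             d += 1
--     if x > 1:
--         s.append(x)
--     if len(s) == 7:
--         return max(s)
--     return 0
-- ===== SOURCE B (Python) =====
-- def pr_mn(x):
--     def spf(n):
--         d = 2
--         while d * d <= n:
--             if n % d == 0:
--                 return d
--             d += 1
--         return n
--
--     cnt = 0
--     p = 0
--     while x > 1: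
--         p = spf(x)
--         x //= p
--         cnt += 1
--     return p if cnt == 7 else 0
-- ===== Notes on version B (the rewrite author's own statement) =====
-- stated objective: alternative
-- what changed: B repeatedly peels the smallest prime factor with a separate helper spf(n) restarted from 2 on each residual value (a staged sequence of smallest-factor searches over the shrinking number, keeping only a peel count and the last peeled factor), instead of A's single resumable sweep of one divisor cursor that accumulates a factor list and takes len/max.
import Mathlib
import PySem

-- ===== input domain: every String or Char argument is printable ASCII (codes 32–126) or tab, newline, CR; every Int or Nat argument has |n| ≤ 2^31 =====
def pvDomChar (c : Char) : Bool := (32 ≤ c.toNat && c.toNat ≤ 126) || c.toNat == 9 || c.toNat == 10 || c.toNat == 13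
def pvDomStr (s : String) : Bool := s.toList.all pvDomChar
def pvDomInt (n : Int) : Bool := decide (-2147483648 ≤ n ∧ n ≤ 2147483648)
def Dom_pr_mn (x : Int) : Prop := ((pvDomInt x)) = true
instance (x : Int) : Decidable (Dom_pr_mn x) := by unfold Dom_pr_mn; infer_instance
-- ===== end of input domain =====

-- B peels the smallest prime factor via a helper restarted from 2 on each residual value,
-- keeping only a peel count and the last peeled factor, instead of A's single divisor sweep
-- that accumulates a factor list and takes len/max.

-- small-term helper theorems used inside the ports' termination proofs
theorem pvLeSucc {d : Int} (h : 2 ≤ d) : 2 ≤ d + 1 := le_trans h (Int.le_add_one (le_refl d))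

theorem pvD0 {d : Int} (hd : 2 ≤ d) : 0 < d := lt_of_lt_of_le two_pos hd

theorem pvD1 {d : Int} (hd : 2 ≤ d) : 1 < d := lt_of_lt_of_le one_lt_two hd

theorem pvXpos {x d : Int} (hd : 2 ≤ d) (h : d * d ≤ x) : 0 < x :=
  lt_of_lt_of_le (mul_pos (pvD0 hd) (pvD0 hd)) h

theorem pvDltX {x d : Int} (hd : 2 ≤ d) (h : d * d ≤ x) : d < x :=
  lt_of_lt_of_le (lt_mul_left (pvD0 hd) (pvD1 hd)) h

theorem pvPos2 {x d : Int} (hd : 2 ≤ d) (h : d * d ≤ x) : 0 < 2 * x - d :=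
  sub_pos.mpr (lt_trans (pvDltX hd h) (lt_two_mul_self (pvXpos hd h)))

theorem pvQlt {x d : Int} (hd : 2 ≤ d) (hx0 : 0 < x) : PySem.Int.floordiv x d < x :=
  (PySem.Int.floordiv_lt_iff_lt_mul (pvD0 hd)).mpr (lt_mul_right hx0 (pvD1 hd))

theorem pvA_dec_div {x d : Int} (hd : 2 ≤ d) (h : d ^ 2 ≤ x) :
    (2 * PySem.Int.floordiv x d - d).toNat < (2 * x - d).toNat :=
  have hdd : d * d ≤ x := pow_two d ▸ h
  (Int.toNat_lt_toNat (pvPos2 hd hdd)).mpr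
    (sub_lt_sub_right (mul_lt_mul_of_pos_left (pvQlt hd (pvXpos hd hdd)) two_pos) d)

theorem pvA_dec_succ {x d : Int} (hd : 2 ≤ d) (h : d ^ 2 ≤ x) :
    (2 * x - (d + 1)).toNat < (2 * x - d).toNat :=
  have hdd : d * d ≤ x := pow_two d ▸ h
  (Int.toNat_lt_toNat (pvPos2 hd hdd)).mpr (sub_lt_sub_left (lt_add_one d) (2 * x))

-- ===== PORT A =====
def loopA (x d : Int) (s : List Int) (hd : 2 ≤ d) : List Int × Int :=
  if _h : d ^ 2 ≤ x then
    if _h2 : PySem.Int.mod x d = 0 then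
      loopA (PySem.Int.floordiv x d) d (s ++ [d]) hd
    else
      loopA x (d + 1) s (pvLeSucc hd)
  else (s, x)
termination_by (2 * x - d).toNat
decreasing_by
  · exact pvA_dec_div hd _h
  · exact pvA_dec_succ hd _h

def pr_mn (x : Int) : Int :=
  let r := loopA x 2 [] (le_refl 2)
  let s := if 1 < r.2 then r.1 ++ [r.2] else r.1
  -- Python's max(s) is guarded by len(s) == 7, so s is nonempty there and getD's default is never used
  if s.length = 7 then (PySem.List.max? s (fun y => y)).getD 0 else 0

-- ===== PORT B =====
theorem pvB_dec {n d : Int} (hd : 2 ≤ d) (h : d * d ≤ n) :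
    (n - (d + 1)).toNat < (n - d).toNat :=
  (Int.toNat_lt_toNat (sub_pos.mpr (pvDltX hd h))).mpr (sub_lt_sub_left (lt_add_one d) n)

-- B's helper spf(n): smallest divisor ≥ 2 (scan from 2), or n itself
def spfB (n d : Int) (hd : 2 ≤ d) : Int :=
  if _h : d * d ≤ n then
    if PySem.Int.mod n d = 0 then d else spfB n (d + 1) (pvLeSucc hd)
  else n
termination_by (n - d).toNat
decreasing_by
  exact pvB_dec hd _h

theorem spfB_ge (n : Int) (hn : 2 ≤ n) : ∀ d (hd : 2 ≤ d), 2 ≤ spfB n d hd := by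
  intro d hd
  fun_induction spfB n d hd with
  | case1 d hd h hm => exact hd
  | case2 d hd h hm ih => exact ih
  | case3 d hd h => exact hn

theorem pvB_loop_dec {x : Int} (hx : 1 < x) :
    (PySem.Int.floordiv x (spfB x 2 (le_refl 2))).toNat < x.toNat :=
  (Int.toNat_lt_toNat (by omega)).mpr
    (pvQlt (spfB_ge x (by omega) 2 (le_refl 2)) (by omega))

def loopB (x cnt p : Int) : Int × Int :=
  if _h : 1 < x then
    let q := spfB x 2 (le_refl 2)
    loopB (PySem.Int.floordiv x q) (cnt + 1) q
  else (cnt, p)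
termination_by x.toNat
decreasing_by
  exact pvB_loop_dec _h

def pr_mn_alt (x : Int) : Int :=
  let r := loopB x 0 0
  if r.1 = 7 then r.2 else 0

-- ===== PRECONDITION & SPEC =====
def Spec_pr_mn (x : Int) (out : Int) : Prop := out = pr_mn_alt x
instance (x : Int) (out : Int) : Decidable (Spec_pr_mn x out) := by unfold Spec_pr_mn; infer_instance

-- ===== CLAIM (what is proved, stated in full; the proofs are below) =====
def Claim_equal_pr_mn : Prop := ∀ (x : Int), Dom_pr_mn x → Spec_pr_mn x (pr_mn x)

-- ===== LEMMAS AND PROOFS =====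

-- reference recursion: the factor list A builds, without the accumulator
theorem pvFA_dec_div {x d : Int} (hd : 2 ≤ d) (h : d ^ 2 ≤ x) (_h2 : d ∣ x) :
    (2 * (x / d) - d).toNat < (2 * x - d).toNat := by
  have hres := pvA_dec_div (x := x) hd h
  rwa [PySem.Int.floordiv_eq_ediv_of_pos (by omega : (0 : Int) < d)] at hres

def FA (x d : Int) (hd : 2 ≤ d) : List Int × Int :=
  if _h : d ^ 2 ≤ x then
    if _h2 : d ∣ x then
      let r := FA (x / d) d hd
      (d :: r.1, r.2)
    else
      FA x (d + 1) (pvLeSucc hd)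
  else ([], x)
termination_by (2 * x - d).toNat
decreasing_by
  · exact pvFA_dec_div hd _h _h2
  · exact pvA_dec_succ hd _h

-- step lemmas unfolding the recursions one step

theorem FA_div {x d : Int} {hd : 2 ≤ d} (h : d ^ 2 ≤ x) (hdvd : d ∣ x) :
    FA x d hd = (d :: (FA (x / d) d hd).1, (FA (x / d) d hd).2) := by
  rw [FA.eq_def, dif_pos h, dif_pos hdvd]

theorem FA_ndiv {x d : Int} {hd : 2 ≤ d} (h : d ^ 2 ≤ x) (hdvd : ¬ d ∣ x) (hd' : 2 ≤ d + 1) :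
    FA x d hd = FA x (d + 1) hd' := by
  rw [FA.eq_def, dif_pos h, dif_neg hdvd]

theorem FA_stop {x d : Int} {hd : 2 ≤ d} (h : ¬ d ^ 2 ≤ x) : FA x d hd = ([], x) := by
  rw [FA.eq_def, dif_neg h]

theorem loopB_go {x cnt p : Int} (h : 1 < x) :
    loopB x cnt p =
      loopB (PySem.Int.floordiv x (spfB x 2 (le_refl 2))) (cnt + 1) (spfB x 2 (le_refl 2)) := by
  rw [loopB.eq_def, dif_pos h]

theorem loopB_stop {x cnt p : Int} (h : ¬ 1 < x) : loopB x cnt p = (cnt, p) := by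
  rw [loopB.eq_def, dif_neg h]

-- the accumulator-free characterisation of A's loop
theorem loopA_eq (x d : Int) (hd : 2 ≤ d) :
    ∀ s : List Int, loopA x d s hd = (s ++ (FA x d hd).1, (FA x d hd).2) := by
  induction x, d, hd using FA.induct with
  | case1 x d hd h hdvd ih =>
    intro s
    have hd0 : (0 : Int) < d := by omega
    have hm : PySem.Int.mod x d = 0 := (PySem.Int.mod_eq_zero_iff_dvd x d).mpr hdvd
    rw [loopA.eq_def, dif_pos h, dif_pos hm, PySem.Int.floordiv_eq_ediv_of_pos hd0, ih,
      FA_div h hdvd]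
    simp
  | case2 x d hd h hdvd ih =>
    intro s
    have hm : ¬ PySem.Int.mod x d = 0 := fun hc => hdvd ((PySem.Int.mod_eq_zero_iff_dvd x d).mp hc)
    rw [loopA.eq_def, dif_pos h, dif_neg hm, ih, FA_ndiv h hdvd (by omega)]
  | case3 x d hd h =>
    intro s
    rw [loopA.eq_def, dif_neg h, FA_stop h]
    simp

-- invariant: every prime factor of x is at least d
def PInv (x d : Int) : Prop := ∀ p : ℕ, Nat.Prime p → (p : Int) ∣ x → d ≤ (p : Int)

theorem pinv_two (x : Int) : PInv x 2 := fun p hp _ => by exact_mod_cast hp.two_le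

theorem pinv_succ {x d : Int} (h : PInv x d) (hnd : ¬ d ∣ x) : PInv x (d + 1) := by
  intro p hp hpx
  have h1 := h p hp hpx
  rcases eq_or_lt_of_le h1 with heq | hlt
  · exact absurd (heq ▸ hpx) hnd
  · omega

theorem pinv_div {x d : Int} (hdvd : d ∣ x) (h : PInv x d) : PInv (x / d) d := by
  intro p hp hpx
  exact h p hp (hpx.trans ⟨d, (Int.ediv_mul_cancel hdvd).symm⟩)

-- any divisor k ≥ 2 of x yields a prime divisor of x at most k
theorem pvSmallPrime {x k : Int} (hk : 2 ≤ k) (hkx : k ∣ x) :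
    ∃ p : ℕ, Nat.Prime p ∧ (p : Int) ∣ x ∧ (p : Int) ≤ k := by
  have hkn : 2 ≤ k.toNat := by omega
  refine ⟨k.toNat.minFac, Nat.minFac_prime (by omega), ?_, ?_⟩
  · have hpm : (k.toNat.minFac : Int) ∣ k := by
      have h2 := Int.natCast_dvd_natCast.mpr (Nat.minFac_dvd k.toNat)
      rwa [Int.toNat_of_nonneg (by omega)] at h2
    exact hpm.trans hkx
  · have hpm : (k.toNat.minFac : Int) ∣ k := by
      have h2 := Int.natCast_dvd_natCast.mpr (Nat.minFac_dvd k.toNat)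
      rwa [Int.toNat_of_nonneg (by omega)] at h2
    exact Int.le_of_dvd (by omega) hpm

-- under PInv x d, x has no divisor strictly between 1 and d
theorem pvNoSmallDvd {x d k : Int} (hinv : PInv x d) (hk : 2 ≤ k) (hkd : k < d) : ¬ k ∣ x := by
  intro hkx
  obtain ⟨p, hp, hpx, hpk⟩ := pvSmallPrime hk hkx
  have := hinv p hp hpx
  omega

-- B's spf finds d when d is the first divisor reachable from the scan point
theorem spf_reach {x d : Int} (hd : 2 ≤ d) (hdvd : d ∣ x) (hdd : d * d ≤ x) (hinv : PInv x d) :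
    ∀ e (he : 2 ≤ e), e ≤ d → spfB x e he = d := by
  intro e he
  fun_induction spfB x e he with
  | case1 e he h hm =>
    intro hle
    rcases eq_or_lt_of_le hle with heq | hlt
    · exact heq
    · exact absurd ((PySem.Int.mod_eq_zero_iff_dvd x e).mp hm) (pvNoSmallDvd hinv he hlt)
  | case2 e he h hm ih =>
    intro hle
    rcases eq_or_lt_of_le hle with heq | hlt
    · subst heq
      exact absurd ((PySem.Int.mod_eq_zero_iff_dvd x e).mpr hdvd) hm
    · exact ih (by omega)
  | case3 e he h =>
    intro hle
    exfalso
    have : e * e ≤ d * d :=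
      mul_le_mul hle hle (by omega) (by omega)
    omega

-- B's spf returns x itself when x has no divisor up to its square root
theorem spf_self {x d : Int} (hd : 2 ≤ d) (_hx : 1 < x) (hdd : ¬ d * d ≤ x) (hinv : PInv x d) :
    ∀ e (he : 2 ≤ e), spfB x e he = x := by
  intro e he
  fun_induction spfB x e he with
  | case1 e he h hm =>
    exfalso
    obtain ⟨p, hp, hpx, hpe⟩ := pvSmallPrime he ((PySem.Int.mod_eq_zero_iff_dvd x e).mp hm)
    have hpd := hinv p hp hpx
    have : d * d ≤ e * e := mul_le_mul (by omega) (by omega) (by omega) (by omega)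
    omega
  | case2 e he h hm ih => exact ih
  | case3 e he h => rfl

-- the full factor list A ends up taking len/max of
def LA (x d : Int) (hd : 2 ≤ d) : List Int :=
  (FA x d hd).1 ++ (if 1 < (FA x d hd).2 then [(FA x d hd).2] else [])

theorem LA_div {x d : Int} {hd : 2 ≤ d} (h : d ^ 2 ≤ x) (hdvd : d ∣ x) :
    LA x d hd = d :: LA (x / d) d hd := by
  unfold LA
  rw [FA_div h hdvd]
  simp

theorem LA_ndiv {x d : Int} {hd : 2 ≤ d} (h : d ^ 2 ≤ x) (hdvd : ¬ d ∣ x) (hd' : 2 ≤ d + 1) :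
    LA x d hd = LA x (d + 1) hd' := by
  unfold LA
  rw [FA_ndiv h hdvd hd']

theorem LA_stop {x d : Int} {hd : 2 ≤ d} (h : ¬ d ^ 2 ≤ x) :
    LA x d hd = if 1 < x then [x] else [] := by
  unfold LA
  rw [FA_stop h]
  simp

-- B's peeling loop computes the length and last element of A's factor list
theorem mainB (x d : Int) (hd : 2 ≤ d) :
    PInv x d → ∀ cnt p : Int,
      loopB x cnt p = (cnt + ((LA x d hd).length : Int), (LA x d hd).getLastD p) := by
  induction x, d, hd using FA.induct with
  | case1 x d hd h hdvd ih =>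
    intro hinv cnt p
    have hd0 : (0 : Int) < d := by omega
    have hdd : d * d ≤ x := by nlinarith [pow_two d ▸ h]
    have hx1 : 1 < x := by nlinarith
    have hspf : spfB x 2 (le_refl 2) = d := spf_reach hd hdvd hdd hinv 2 (le_refl 2) hd
    rw [loopB_go hx1, hspf, PySem.Int.floordiv_eq_ediv_of_pos hd0,
      ih (pinv_div hdvd hinv), LA_div h hdvd]
    simp only [List.length_cons, List.getLastD_cons, Prod.mk.injEq]
    refine ⟨by push_cast; ring, trivial⟩
  | case2 x d hd h hdvd ih =>
    intro hinv cnt p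
    rw [ih (pinv_succ hinv hdvd), LA_ndiv h hdvd (by omega)]
  | case3 x d hd h =>
    intro hinv cnt p
    have hdd : ¬ d * d ≤ x := fun hc => h (by nlinarith)
    rw [LA_stop h]
    by_cases hx : 1 < x
    · have hspf : spfB x 2 (le_refl 2) = x := spf_self hd hx hdd hinv 2 (le_refl 2)
      have hq : PySem.Int.floordiv x x = 1 := by
        rw [PySem.Int.floordiv_eq_ediv_of_pos (by omega), Int.ediv_self (by omega)]
      rw [loopB_go hx, hspf, hq, loopB_stop (by omega), if_pos hx]
      simp
    · rw [loopB_stop hx, if_neg hx]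
      simp
-- A's factor list is bounded below by d and nondecreasing
theorem auxA (x d : Int) (hd : 2 ≤ d) :
    PInv x d → (∀ a ∈ LA x d hd, d ≤ a) ∧ List.IsChain (· ≤ ·) (LA x d hd) := by
  induction x, d, hd using FA.induct with
  | case1 x d hd h hdvd ih =>
    intro hinv
    obtain ⟨hmem, hch⟩ := ih (pinv_div hdvd hinv)
    rw [LA_div h hdvd]
    refine ⟨?_, ?_⟩
    · intro a ha
      rcases List.mem_cons.mp ha with rfl | ha
      · exact le_refl _
      · exact hmem a ha
    · rw [List.isChain_cons]
      exact ⟨fun b hb => hmem b (List.mem_of_mem_head? hb), hch⟩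
  | case2 x d hd h hdvd ih =>
    intro hinv
    obtain ⟨hmem, hch⟩ := ih (pinv_succ hinv hdvd)
    rw [LA_ndiv h hdvd (by omega)]
    exact ⟨fun a ha => le_trans (show d ≤ d + 1 by omega) (hmem a ha), hch⟩
  | case3 x d hd h =>
    intro hinv
    rw [LA_stop h]
    by_cases hx : 1 < x
    · rw [if_pos hx]
      refine ⟨?_, List.isChain_singleton x⟩
      intro a ha
      rcases List.mem_singleton.mp ha with rfl
      obtain ⟨p, hp, hpx, hpa⟩ := pvSmallPrime (by omega) (dvd_refl a)
      have := hinv p hp hpx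
      omega
    · rw [if_neg hx]
      exact ⟨by simp, List.isChain_nil⟩

-- running max of a nondecreasing list is its last element
theorem foldl_max_chain :
    ∀ (t : List Int) (a : Int), List.IsChain (· ≤ ·) (a :: t) →
      t.foldl max a = (a :: t).getLast (List.cons_ne_nil a t) := by
  intro t
  induction t with
  | nil => intro a _; simp
  | cons b t ih =>
    intro a h
    rw [List.isChain_cons_cons] at h
    simp only [List.foldl_cons]
    rw [max_eq_right h.1, List.getLast_cons_cons]
    exact ih b h.2

-- ===== VERDICT (by name: the statement is the Claim_ definition above) =====
theorem pr_mn_spec : Claim_equal_pr_mn := by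
  unfold Claim_equal_pr_mn Spec_pr_mn
  intro x _
  have h2 : (2 : Int) ≤ 2 := le_refl 2
  have hA : pr_mn x =
      (if (LA x 2 h2).length = 7 then (PySem.List.max? (LA x 2 h2) (fun y => y)).getD 0 else 0) := by
    unfold pr_mn
    rw [loopA_eq x 2 h2]
    simp only [List.nil_append]
    have he : (if 1 < (FA x 2 h2).2 then (FA x 2 h2).1 ++ [(FA x 2 h2).2] else (FA x 2 h2).1)
        = LA x 2 h2 := by
      unfold LA
      split <;> simp
    rw [he]
  have hm := mainB x 2 h2 (pinv_two x) 0 0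
  have hB : pr_mn_alt x =
      (if ((0 : Int) + ((LA x 2 h2).length : Int)) = 7 then (LA x 2 h2).getLastD 0 else 0) := by
    show (if (loopB x 0 0).1 = 7 then (loopB x 0 0).2 else 0) = _
    rw [hm]
  rw [hA, hB]
  by_cases hlen : (LA x 2 h2).length = 7
  · rw [if_pos hlen, if_pos (by omega)]
    obtain ⟨-, hch⟩ := auxA x 2 h2 (pinv_two x)
    rcases hLcase : LA x 2 h2 with _ | ⟨a, t⟩
    · rw [hLcase] at hlen; simp at hlen
    · rw [hLcase] at hch
      rw [PySem.List.max?_id_cons, Option.getD_some, foldl_max_chain t a hch]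
      rw [List.getLastD_eq_getLast?, List.getLast?_eq_some_getLast] <;> simp
  · rw [if_neg hlen, if_neg (by omega)]
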